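-- pv_equiv track=rewrite | github.com/Yassine-Benchekroun/Matrix-Calculator-gui | src/logic.py | elementwise_multiply
-- ===== SOURCE A (Python) =====
-- def elementwise_multiply(matrices):
--     def multiply_two(A, B):
--         if len(A) != len(B) or len(A[0]) != len(B[0]):
--             raise ValueError("Matrices must have the same dimensions for element-wise multiplication")
--         return [[A[i][j] * B[i][j] for j in range(len(A[0]))] for i in range(len(A))]
--
--     if len(matrices) < 2:
--         raise ValueError("Element-wise multiplication requires at least 2 matrices")
--
--     result = matrices[0]
--     for matrix in matrices[1:]:
--         result = multiply_two(result, matrix)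
--     return result
-- ===== SOURCE B (Python) =====
-- def elementwise_multiply(matrices):
--     if len(matrices) < 2:
--         raise ValueError("Element-wise multiplication requires at least 2 matrices")
--     base = matrices[0]
--     rows, cols = len(base), len(base[0])
--     rest = matrices[1:]
--     for m in rest:
--         if len(m) != rows or len(m[0]) != cols:
--             raise ValueError("Matrices must have the same dimensions for element-wise multiplication")
--     result = []
--     for i in range(rows):
--         row = []
--         for j in range(cols):
--             p = base[i][j]
--             for m in rest:
--                 p *= m[i][j]
--             row.append(p)
--         result.append(row)
--     return result
-- ===== Notes on version B (the rewrite author's own statement) =====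
-- stated objective: alternative
-- what changed: B validates all shapes up front and folds each cell's product position-wise across all matrices in one pass, instead of A's k-1 pairwise passes each materialising a full intermediate matrix; same asymptotic cost, different traversal shape.
import Mathlib
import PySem

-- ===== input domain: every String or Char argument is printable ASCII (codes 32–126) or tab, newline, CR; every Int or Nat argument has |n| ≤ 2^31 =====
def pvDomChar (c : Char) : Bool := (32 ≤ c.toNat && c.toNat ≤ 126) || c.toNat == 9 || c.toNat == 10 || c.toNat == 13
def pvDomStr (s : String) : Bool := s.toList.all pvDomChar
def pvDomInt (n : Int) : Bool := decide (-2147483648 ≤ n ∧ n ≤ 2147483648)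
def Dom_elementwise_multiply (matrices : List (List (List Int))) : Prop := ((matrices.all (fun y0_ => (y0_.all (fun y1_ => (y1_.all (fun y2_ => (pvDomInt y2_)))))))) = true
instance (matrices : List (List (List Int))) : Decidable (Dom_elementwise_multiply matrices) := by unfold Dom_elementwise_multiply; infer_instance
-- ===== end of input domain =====

-- One honest line: B validates shapes once and folds each cell's product across all
-- matrices in a single position-wise pass, instead of A's k-1 pairwise full-matrix passes.

-- ===== PORT A =====
-- multiply_two: the ValueError branch returns [] in the port (those inputs are outside Pre_)
def pvMulTwo (A B : List (List Int)) : List (List Int) :=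
  if A.length ≠ B.length ∨ (A.headD []).length ≠ (B.headD []).length then []
  else (List.range A.length).map (fun i =>
    (List.range (A.headD []).length).map (fun j =>
      ((A.getD i []).getD j 0) * ((B.getD i []).getD j 0)))

def elementwise_multiply (matrices : List (List (List Int))) : List (List Int) :=
  if matrices.length < 2 then []   -- Python raises ValueError here; outside Pre_
  else (matrices.drop 1).foldl pvMulTwo (matrices.headD [])

-- ===== PORT B =====
def elementwise_multiply_alt (matrices : List (List (List Int))) : List (List Int) :=
  if matrices.length < 2 then []   -- ValueError; outside Pre_
  else
    let base := matrices.headD []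
    let rows := base.length
    let cols := (base.headD []).length
    let rest := matrices.drop 1
    if rest.any (fun m => m.length ≠ rows ∨ (m.headD []).length ≠ cols) then []  -- ValueError; outside Pre_
    else (List.range rows).map (fun i =>
      (List.range cols).map (fun j =>
        rest.foldl (fun p m => p * ((m.getD i []).getD j 0)) ((base.getD i []).getD j 0)))

-- ===== PRECONDITION & SPEC =====
-- Pre_: exactly the inputs on which Python A returns: at least 2 matrices, a nonempty first
-- matrix, every matrix with the same row count and same first-row length as the first, and
-- every row long enough for every accessed column (otherwise A raises ValueError/IndexError).
def Pre_elementwise_multiply (matrices : List (List (List Int))) : Prop :=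
  2 ≤ matrices.length ∧ matrices.headD [] ≠ [] ∧
  (∀ m ∈ matrices, m.length = (matrices.headD []).length ∧
    (m.headD []).length = ((matrices.headD []).headD []).length ∧
    ∀ row ∈ m, ((matrices.headD []).headD []).length ≤ row.length)
instance (matrices : List (List (List Int))) : Decidable (Pre_elementwise_multiply matrices) := by
  unfold Pre_elementwise_multiply; infer_instance

def pvWitness_elementwise_multiply : List (List (List Int)) :=
  [[[1, 2], [3, 4]], [[5, 6], [7, 8]], [[-1, 0], [2, 3]]]

def Spec_elementwise_multiply (matrices : List (List (List Int))) (out : List (List Int)) : Prop := out = elementwise_multiply_alt matrices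
instance (matrices : List (List (List Int))) (out : List (List Int)) : Decidable (Spec_elementwise_multiply matrices out) := by unfold Spec_elementwise_multiply; infer_instance

-- ===== CLAIM (what is proved, stated in full; the proofs are below) =====
def Claim_equal_elementwise_multiply : Prop := ∀ (matrices : List (List (List Int))), Dom_elementwise_multiply matrices → Pre_elementwise_multiply matrices → Spec_elementwise_multiply matrices (elementwise_multiply matrices)

-- ===== LEMMAS AND PROOFS =====

theorem getD_map_range {α : Type} (f : Nat → α) (d : α) {n i : Nat} (hi : i < n) :
    ((List.range n).map f).getD i d = f i := by
  rw [List.getD_eq_getElem?_getD]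
  simp [hi]

-- pvMulTwo on shape-compatible inputs: the check passes and the result is the map.
theorem pvMulTwo_eq {A B : List (List Int)}
    (h1 : A.length = B.length) (h2 : (A.headD []).length = (B.headD []).length) :
    pvMulTwo A B = (List.range A.length).map (fun i =>
      (List.range (A.headD []).length).map (fun j =>
        ((A.getD i []).getD j 0) * ((B.getD i []).getD j 0))) := by
  unfold pvMulTwo
  rw [if_neg (by push Not; exact ⟨h1, h2⟩)]

-- Core invariant: folding pvMulTwo over shape-compatible matrices from an exactly
-- rectangular r×c accumulator equals the position-wise fold of B.
theorem fold_mul_eq (r c : Nat) (hr : 0 < r) :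
    ∀ (ms : List (List (List Int))) (acc : List (List Int)),
      acc.length = r → (∀ row ∈ acc, row.length = c) →
      (∀ m ∈ ms, m.length = r ∧ (m.headD []).length = c) →
      ms.foldl pvMulTwo acc =
        (List.range r).map (fun i => (List.range c).map (fun j =>
          ms.foldl (fun p m => p * ((m.getD i []).getD j 0)) ((acc.getD i []).getD j 0))) := by
  intro ms
  induction ms with
  | nil =>
    intro acc hlen hrows _
    simp only [List.foldl_nil]
    apply List.ext_getElem
    · simp [hlen]
    · intro i hi hi'
      have hiR : i < r := by simpa [hlen] using hi
      have hrow : acc[i].length = c := hrows _ (List.getElem_mem hi)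
      apply List.ext_getElem
      · simp [hrow]
      · intro j hj hj'
        have hjc : j < c := by simpa [hrow] using hj
        simp [List.getD_eq_getElem?_getD, hi, hj]
  | cons m ms ih =>
    intro acc hlen hrows hms
    have hm := hms m (List.mem_cons_self ..)
    have hhead : (acc.headD []).length = c := by
      cases acc with
      | nil => simp [← hlen] at hr
      | cons a t => exact hrows a (List.mem_cons_self ..)
    have hstep : pvMulTwo acc m = (List.range r).map (fun i =>
        (List.range c).map (fun j =>
          ((acc.getD i []).getD j 0) * ((m.getD i []).getD j 0))) := by
      rw [pvMulTwo_eq (by omega) (by omega)]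
      rw [hlen, hhead]
    have hacclen : (pvMulTwo acc m).length = r := by rw [hstep]; simp
    have haccrows : ∀ row ∈ pvMulTwo acc m, row.length = c := by
      rw [hstep]; intro row hrow
      obtain ⟨i, _, rfl⟩ := List.mem_map.mp hrow
      simp
    rw [List.foldl_cons, ih _ hacclen haccrows (fun x hx => hms x (List.mem_cons_of_mem _ hx))]
    apply List.map_congr_left
    intro i hi
    apply List.map_congr_left
    intro j hj
    rw [List.mem_range] at hi hj
    rw [hstep, getD_map_range _ _ hi, getD_map_range _ _ hj, List.foldl_cons]

-- ===== VERDICT (by name: the statement is the Claim_ definition above) =====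
theorem elementwise_multiply_spec : Claim_equal_elementwise_multiply := by
  intro matrices _ hpre
  obtain ⟨h2, hne, hall⟩ := hpre
  unfold Spec_elementwise_multiply elementwise_multiply elementwise_multiply_alt
  have hnl : ¬ matrices.length < 2 := by omega
  rw [if_neg hnl, if_neg hnl]
  set base := matrices.headD [] with hbase
  set r := base.length with hrdef
  set c := (base.headD []).length with hcdef
  have hr : 0 < r := List.length_pos_of_ne_nil hne
  have hmem0 : base ∈ matrices := by
    cases matrices with
    | nil => simp at h2
    | cons x t => simp [hbase]
  have hrest : ∀ m ∈ matrices.drop 1, m.length = r ∧ (m.headD []).length = c := by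
    intro m hm
    obtain ⟨hml, hmh, _⟩ := hall m (List.mem_of_mem_drop hm)
    exact ⟨hml, hmh⟩
  have hany : ¬ (matrices.drop 1).any (fun m => m.length ≠ r ∨ (m.headD []).length ≠ c) := by
    simp only [List.any_eq_true, not_exists]
    intro m hm
    obtain ⟨hm1, hd⟩ := hm
    obtain ⟨ha, hb⟩ := hrest m hm1
    rw [decide_eq_true_iff] at hd
    rcases hd with h | h
    · exact h ha
    · exact h hb
  rw [if_neg (by simpa [hrdef, hcdef] using hany)]
  -- unroll the fold one step: matrices.drop 1 = m :: rest
  cases hdrop : matrices.drop 1 with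
  | nil =>
    exfalso
    have := List.length_drop (l := matrices) (i := 1)
    rw [hdrop] at this; simp at this; omega
  | cons m rest =>
    have hmmem : m ∈ matrices.drop 1 := by rw [hdrop]; exact List.mem_cons_self ..
    obtain ⟨hml, hmh⟩ := hrest m hmmem
    have hstep : pvMulTwo base m = (List.range r).map (fun i =>
        (List.range c).map (fun j =>
          ((base.getD i []).getD j 0) * ((m.getD i []).getD j 0))) := by
      rw [pvMulTwo_eq (by omega) (by omega)]
    have hacclen : (pvMulTwo base m).length = r := by rw [hstep]; simp
    have haccrows : ∀ row ∈ pvMulTwo base m, row.length = c := by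
      rw [hstep]; intro row hrow
      obtain ⟨i, _, rfl⟩ := List.mem_map.mp hrow
      simp
    have hrest' : ∀ x ∈ rest, x.length = r ∧ (x.headD []).length = c := by
      intro x hx
      exact hrest x (by rw [hdrop]; exact List.mem_cons_of_mem _ hx)
    rw [List.foldl_cons]
    rw [fold_mul_eq r c hr rest (pvMulTwo base m) hacclen haccrows hrest']
    apply List.map_congr_left
    intro i hi
    apply List.map_congr_left
    intro j hj
    rw [List.mem_range] at hi hj
    rw [hstep, getD_map_range _ _ hi, getD_map_range _ _ hj]
    simp
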